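-- pv_equiv track=rewrite | github.com/rishabhgokhe/Unsupervised-Marine-Latent-Detection | src/evaluation/metrics.py | labels_to_boundaries
-- ===== SOURCE A (Python) =====
-- from typing import Dict, Iterable, List, Optional, Sequence, Tuple
--
-- def labels_to_boundaries(labels: Sequence[int]) -> List[int]:
--     boundaries: List[int] = []
--     prev = labels[0]
--     for i in range(1, len(labels)):
--         if labels[i] != prev:
--             boundaries.append(i)
--         prev = labels[i]
--     return boundaries
-- ===== SOURCE B (Python) =====
-- def labels_to_boundaries(labels):
--     # Run-length encode the labels, then prefix-sum all run lengths but the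
--     # last: each partial sum is the start index of the next run, i.e. a change point.
--     lengths = []
--     cur = object()
--     for x in labels:
--         if lengths and x == cur:
--             lengths[-1] += 1
--         else:
--             lengths.append(1)
--             cur = x
--     out = []
--     s = 0
--     for n in lengths[:-1]:
--         s += n
--         out.append(s)
--     return out
-- ===== Notes on version B (the rewrite author's own statement) =====
-- stated objective: alternative
-- what changed: Replaces the running prev-comparison scan with run-length encoding followed by prefix sums of all run lengths but the last (each partial sum is a change index).
import Mathlib
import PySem

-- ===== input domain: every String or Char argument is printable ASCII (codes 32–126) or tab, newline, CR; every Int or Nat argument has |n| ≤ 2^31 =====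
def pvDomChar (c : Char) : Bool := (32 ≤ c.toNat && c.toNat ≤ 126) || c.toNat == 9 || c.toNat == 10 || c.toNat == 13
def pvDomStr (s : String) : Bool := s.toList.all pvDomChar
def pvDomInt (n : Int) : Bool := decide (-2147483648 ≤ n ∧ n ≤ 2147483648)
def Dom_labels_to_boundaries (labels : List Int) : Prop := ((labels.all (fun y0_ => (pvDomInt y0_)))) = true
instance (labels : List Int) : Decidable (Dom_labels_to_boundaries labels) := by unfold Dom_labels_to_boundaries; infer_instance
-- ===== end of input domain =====

-- B computes the same change indices by run-length encoding + prefix sums instead of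
-- A's running prev-comparison; same cost, different decomposition.

-- ===== PORT A =====
-- prev = labels[0]; for i in range(1, len(labels)): if labels[i] != prev: append i; prev = labels[i]
def labels_to_boundaries (labels : List Int) : List Int :=
  let prev := PySem.List.pyGetD labels 0 0   -- labels[0]; Pre_ excludes [], where Python raises IndexError
  ((PySem.List.pyRange 1 (labels.length : Int) 1).foldl
    (fun (st : List Int × Int) i =>
      let cur := PySem.List.pyGetD labels i 0  -- in range for every i the loop visits
      ((if cur ≠ st.2 then st.1 ++ [i] else st.1), cur))
    ([], prev)).1

-- ===== PORT B =====
-- first loop of Source B: build the run lengths; state = (lengths, cur), Python's `object()` sentinel = none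
def pvAltLengths (labels : List Int) : List Int :=
  (labels.foldl
    (fun (st : List Int × Option Int) x =>
      if st.1 ≠ [] ∧ some x = st.2 then
        (st.1.dropLast ++ [(st.1.getLast?.getD 0) + 1], st.2)   -- lengths[-1] += 1
      else
        (st.1 ++ [1], some x))
    ([], none)).1

-- second loop of Source B: running prefix sums of lengths[:-1]
def labels_to_boundaries_alt (labels : List Int) : List Int :=
  let lengths := pvAltLengths labels
  (lengths.dropLast.foldl
    (fun (st : List Int × Int) n => (st.1 ++ [st.2 + n], st.2 + n))
    ([], 0)).1

-- ===== PRECONDITION & SPEC =====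
-- Pre_ excludes only the empty list, on which A raises IndexError (labels[0]).
def Pre_labels_to_boundaries (labels : List Int) : Prop := labels ≠ []
instance (labels : List Int) : Decidable (Pre_labels_to_boundaries labels) := by unfold Pre_labels_to_boundaries; infer_instance
def pvWitness_labels_to_boundaries : List Int := [1, 1, 2]

def Spec_labels_to_boundaries (labels : List Int) (out : List Int) : Prop := out = labels_to_boundaries_alt labels
instance (labels : List Int) (out : List Int) : Decidable (Spec_labels_to_boundaries labels out) := by unfold Spec_labels_to_boundaries; infer_instance

-- ===== CLAIM (what is proved, stated in full; the proofs are below) =====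
def Claim_equal_labels_to_boundaries : Prop := ∀ (labels : List Int), Dom_labels_to_boundaries labels → Pre_labels_to_boundaries labels → Spec_labels_to_boundaries labels (labels_to_boundaries labels)

-- ===== LEMMAS AND PROOFS =====

-- reference function: change indices of suf, with p the previous label and k the index of the head of suf
def pvChg (k : Int) (p : Int) : List Int → List Int
  | [] => []
  | x :: xs => if x ≠ p then k :: pvChg (k + 1) x xs else pvChg (k + 1) x xs

-- reference run lengths of (a run of p's of length n) ++ rest, merged at the seam
def pvRlAux (p : Int) (n : Int) : List Int → List Int
  | [] => [n]
  | x :: xs => if x = p then pvRlAux p (n + 1) xs else n :: pvRlAux x 1 xs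

theorem pvRlAux_ne_nil (p n : Int) (l : List Int) : pvRlAux p n l ≠ [] := by
  cases l with
  | nil => simp [pvRlAux]
  | cons x xs => simp only [pvRlAux]; split <;> simp [pvRlAux_ne_nil]

-- A's indexed fold computes pvChg
theorem pvA_fold (suf : List Int) : ∀ (pre : List Int) (p : Int) (acc : List Int),
    ((PySem.List.pyRange ((pre.length : Int) + 1) ((pre.length : Int) + 1 + suf.length) 1).foldl
      (fun (st : List Int × Int) i =>
        let cur := PySem.List.pyGetD (pre ++ p :: suf) i 0
        ((if cur ≠ st.2 then st.1 ++ [i] else st.1), cur)) (acc, p)).1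
    = acc ++ pvChg ((pre.length : Int) + 1) p suf := by
  induction suf with
  | nil =>
    intro pre p acc
    simp [PySem.List.pyRange_one_eq_nil, pvChg]
  | cons x xs ih =>
    intro pre p acc
    rw [PySem.List.pyRange_one_cons (by push_cast [List.length_cons]; omega)]
    simp only [List.foldl_cons]
    have hget : PySem.List.pyGetD (pre ++ p :: x :: xs) ((pre.length : Int) + 1) 0 = x := by
      have h1 : ((pre.length : Int) + 1) = ((pre.length + 1 : Nat) : Int) := by push_cast; ring
      rw [h1, PySem.List.pyGetD_natCast]
      simp [List.getD]
    have hco : pre ++ p :: x :: xs = (pre ++ [p]) ++ x :: xs := by simp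
    rw [hco] at hget
    simp only [hco]
    rw [hget]
    have hIH := ih (pre ++ [p]) x (if x ≠ p then acc ++ [(pre.length : Int) + 1] else acc)
    have hlen : ((pre ++ [p]).length : Int) = (pre.length : Int) + 1 := by simp
    rw [hlen] at hIH
    have hrg : (pre.length : Int) + 1 + 1 + (xs.length : Int)
        = (pre.length : Int) + 1 + ((x :: xs).length : Int) := by
      push_cast [List.length_cons]; ring
    rw [hrg] at hIH
    rw [hIH]
    by_cases hxp : x = p <;> simp [pvChg, hxp, List.append_assoc]

-- B's first fold computes pvRlAux
theorem pvB_lengths (rest : List Int) : ∀ (L : List Int) (p n : Int),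
    rest.foldl
      (fun (st : List Int × Option Int) x =>
        if st.1 ≠ [] ∧ some x = st.2 then
          (st.1.dropLast ++ [(st.1.getLast?.getD 0) + 1], st.2)
        else
          (st.1 ++ [1], some x))
      (L ++ [n], some p)
    = (L ++ pvRlAux p n rest, some ((p :: rest).getLast (by simp))) := by
  induction rest with
  | nil => intro L p n; simp [pvRlAux]
  | cons x xs ih =>
    intro L p n
    simp only [List.foldl_cons]
    by_cases hxp : x = p
    · have hc : ((L ++ [n] : List Int) ≠ [] ∧ some x = some p) := by simp [hxp]
      rw [if_pos hc]
      simp only [List.dropLast_concat, List.getLast?_concat, Option.getD_some]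
      rw [ih L p (n + 1)]
      simp [pvRlAux, hxp]
    · have hc : ¬((L ++ [n] : List Int) ≠ [] ∧ some x = some p) := by simp [hxp]
      rw [if_neg hc]
      rw [ih (L ++ [n]) x 1]
      simp [pvRlAux, hxp, List.append_assoc, List.getLast_cons]

-- B's second fold computes prefix sums
def pvAccum (s : Int) : List Int → List Int
  | [] => []
  | n :: ns => (s + n) :: pvAccum (s + n) ns

theorem pvB_accum (L : List Int) : ∀ (out : List Int) (s : Int),
    (L.foldl (fun (st : List Int × Int) n => (st.1 ++ [st.2 + n], st.2 + n)) (out, s)).1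
    = out ++ pvAccum s L := by
  induction L with
  | nil => intro out s; simp [pvAccum]
  | cons n ns ih => intro out s; simp only [List.foldl_cons]; rw [ih]; simp [pvAccum]

-- prefix sums of all run lengths but the last = change indices
theorem pvAccum_chg (rest : List Int) : ∀ (s n p : Int),
    pvAccum s (pvRlAux p n rest).dropLast = pvChg (s + n) p rest := by
  induction rest with
  | nil => intro s n p; simp [pvRlAux, pvChg, pvAccum]
  | cons x xs ih =>
    intro s n p
    by_cases hxp : x = p
    · subst hxp
      have h1 : pvRlAux x n (x :: xs) = pvRlAux x (n + 1) xs := by simp [pvRlAux]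
      have h2 : pvChg (s + n) x (x :: xs) = pvChg (s + n + 1) x xs := by simp [pvChg]
      rw [h1, h2, ih s (n + 1) x, add_assoc]
    · have h1 : pvRlAux p n (x :: xs) = n :: pvRlAux x 1 xs := by simp [pvRlAux, hxp]
      have h2 : pvChg (s + n) p (x :: xs) = (s + n) :: pvChg (s + n + 1) x xs := by
        simp [pvChg, hxp]
      rw [h1, h2, List.dropLast_cons_of_ne_nil (pvRlAux_ne_nil x 1 xs)]
      simp only [pvAccum]
      rw [ih (s + n) 1 x, add_assoc]

-- A on a nonempty list computes pvChg
theorem pvA_spec (p : Int) (rest : List Int) :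
    labels_to_boundaries (p :: rest) = pvChg 1 p rest := by
  have h := pvA_fold rest [] p []
  simp only [List.length_nil, Nat.cast_zero, zero_add, List.nil_append] at h
  unfold labels_to_boundaries
  have hlen : (((p :: rest).length : Int)) = 1 + (rest.length : Int) := by
    push_cast [List.length_cons]; ring
  rw [hlen]
  have hp : PySem.List.pyGetD (p :: rest) 0 0 = p := by
    simp [PySem.List.pyGetD_zero_cons]
  rw [hp]
  exact h

-- B on a nonempty list computes the prefix sums of the run lengths but the last
theorem pvB_spec (p : Int) (rest : List Int) :
    labels_to_boundaries_alt (p :: rest) = pvAccum 0 (pvRlAux p 1 rest).dropLast := by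
  unfold labels_to_boundaries_alt pvAltLengths
  simp only [List.foldl_cons]
  have hstep0 : (if ([] : List Int) ≠ [] ∧ some p = (none : Option Int) then
        (([] : List Int).dropLast ++ [(([] : List Int).getLast?.getD 0) + 1], (none : Option Int))
      else (([] : List Int) ++ [1], some p)) = (([] : List Int) ++ [(1 : Int)], some p) := by simp
  rw [hstep0, pvB_lengths rest [] p 1]
  simpa using pvB_accum (pvRlAux p 1 rest).dropLast [] 0

-- ===== VERDICT (by name: the statement is the Claim_ definition above) =====
theorem labels_to_boundaries_spec : Claim_equal_labels_to_boundaries := by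
  intro labels _ hpre
  unfold Spec_labels_to_boundaries
  cases labels with
  | nil => exact absurd rfl hpre
  | cons p rest =>
    rw [pvA_spec, pvB_spec, pvAccum_chg rest 0 1 p, zero_add]
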